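-- pv_equiv track=rewrite | github.com/ev-gordievskiy/evgeniy_gordievskiy_pish | homework/lr4.py | create_dict_string
-- ===== SOURCE A (Python) =====
-- def create_dict_string(string):                  # Создаем фунцию формирования словаря из букв и их количества в строке
--     list_string_sort = sorted(list(set(string))) # Формируем список ключей для словаря
--     dict_string = {}    # Создаем пустой словарь
--     sum_letters = 0     # Создаем счетчик букв
--     for i in range(len(list_string_sort)):  # Запускаем цикл по ключам из списка
--         for y in range(len(string)):        # Запускаем цикл по буквам из строки
--             if list_string_sort[i] == string[y]:    # Сравниваем ключ и букву
--                 sum_letters += 1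
--         dict_string[list_string_sort[i]] = sum_letters  # Добавляем ключу из списка значение счетчика букв
--         sum_letters = 0
--
--     return dict_string
--
-- string = "abracadabra"
--
-- dict_string = create_dict_string(string)
-- ===== SOURCE B (Python) =====
-- def create_dict_string(string):  # sort the characters, then one grouping pass: each run of equal chars gives one (char, run length) entry
--     def group(chars):
--         if not chars:
--             return []
--         c = chars[0]
--         i = 1
--         while i < len(chars) and chars[i] == c:
--             i += 1
--         return [(c, i)] + group(chars[i:])
--     return dict(group(sorted(string)))
-- ===== Notes on version B (the rewrite author's own statement) =====
-- stated objective: faster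
-- what changed: B sorts the string's characters once and emits (char, run length) pairs in a single linear grouping pass over the sorted sequence, instead of A's rescan of the entire string for every distinct character.
import Mathlib
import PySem

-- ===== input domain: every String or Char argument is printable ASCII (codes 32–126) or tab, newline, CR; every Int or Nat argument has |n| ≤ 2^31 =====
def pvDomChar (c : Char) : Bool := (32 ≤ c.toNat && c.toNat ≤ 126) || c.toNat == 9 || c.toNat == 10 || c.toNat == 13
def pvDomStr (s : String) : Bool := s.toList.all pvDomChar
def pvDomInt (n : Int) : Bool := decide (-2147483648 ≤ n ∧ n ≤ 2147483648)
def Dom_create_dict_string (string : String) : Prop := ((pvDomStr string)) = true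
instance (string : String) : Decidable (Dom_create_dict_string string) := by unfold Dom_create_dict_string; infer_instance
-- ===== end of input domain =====

-- B sorts the string's characters once and makes one linear grouping pass over runs of equal
-- characters, instead of A's scan of the whole string for every distinct character.

-- ===== PORT A =====
-- A: keys = sorted(set(string)); for each key scan the whole string counting matches; insert into dict.
def create_dict_string (string : String) : List (String × Int) :=
  let list_string_sort := PySem.List.sorted (PySem.Set.ofList string.toList) (fun c => c)
  let dict_string : PySem.Dict String Int := PySem.Dict.empty
  (List.foldl (fun d i =>
      let sum_letters := List.foldl (fun s y =>
          if PySem.List.pyGetD list_string_sort i ' ' = PySem.List.pyGetD string.toList y ' '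
          then s + 1 else s) (0 : Int)
        (PySem.List.pyRange 0 (PySem.List.len string.toList))
      PySem.Dict.insert d (String.singleton (PySem.List.pyGetD list_string_sort i ' ')) sum_letters)
    dict_string
    (PySem.List.pyRange 0 (PySem.List.len list_string_sort))).items

-- ===== PORT B =====
-- the `while i < len(chars) and chars[i] == c: i += 1` loop of Source B: length of the leading run of c
def pvRun (c : Char) : List Char → Nat
  | [] => 0
  | x :: xs => if x = c then pvRun c xs + 1 else 0

-- Source B's recursive `group`: one (char, run length) pair per run of the (sorted) character list
def pvGroup : List Char → List (Char × Nat)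
  | [] => []
  | c :: rest => (c, pvRun c rest + 1) :: pvGroup (rest.drop (pvRun c rest))
  termination_by l => l.length
  decreasing_by simp

def create_dict_string_alt (string : String) : List (String × Int) :=
  (PySem.Dict.ofList ((pvGroup (PySem.List.sorted string.toList (fun c => c))).map
      (fun p => (String.singleton p.1, (p.2 : Int))))).items

-- ===== PRECONDITION & SPEC =====
def Spec_create_dict_string (string : String) (out : List (String × Int)) : Prop := out = create_dict_string_alt string
instance (string : String) (out : List (String × Int)) : Decidable (Spec_create_dict_string string out) := by unfold Spec_create_dict_string; infer_instance

-- ===== CLAIM (what is proved, stated in full; the proofs are below) =====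
def Claim_equal_create_dict_string : Prop := ∀ (string : String), Dom_create_dict_string string → Spec_create_dict_string string (create_dict_string string)

-- ===== LEMMAS AND PROOFS =====

theorem singleton_inj {c d : Char} (h : String.singleton c = String.singleton d) : c = d := by
  have := congrArg String.toList h; simpa using this

-- folding Dict.insert over pairs whose keys are pairwise-new just appends them
theorem foldl_insert_items {ν : Type} (ps : List (String × ν)) :
    ∀ (d : PySem.Dict String ν), (ps.map Prod.fst).Nodup →
    (∀ k ∈ ps.map Prod.fst, ∀ q ∈ d.items, q.1 ≠ k) →
    (List.foldl (fun acc p => PySem.Dict.insert acc p.1 p.2) d ps).items = d.items ++ ps := by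
  induction ps with
  | nil => intro d _ _; simp
  | cons p ps ih =>
    intro d hnd hfresh
    have hcon : d.contains p.1 = false := by
      simp [PySem.Dict.contains, List.any_eq_false]
      intro a b hab
      exact fun he => hfresh p.1 (by simp) (a, b) hab (by simpa using he)
    have hins : (PySem.Dict.insert d p.1 p.2).items = d.items ++ [(p.1, p.2)] := by
      simp [PySem.Dict.insert, hcon]
    simp only [List.foldl_cons]
    rw [ih _ (by simpa using hnd.of_cons) ?_, hins]
    · simp
    · intro k hk q hq
      rw [hins] at hq
      rcases List.mem_append.1 hq with h | h
      · exact hfresh k (by simp [hk]) q h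
      · simp at h
        subst h
        simp only [List.map_cons, List.nodup_cons] at hnd
        exact fun he => hnd.1 (by rw [he]; exact hk)

-- run/count/drop facts about the leading run of a sorted tail
theorem pvRun_facts (c : Char) (rest : List Char)
    (hle : ∀ x ∈ rest, c ≤ x) (hp : rest.Pairwise (· ≤ ·)) :
    rest.count c = pvRun c rest ∧ (∀ x ∈ rest.take (pvRun c rest), x = c) ∧
      (∀ x ∈ rest.drop (pvRun c rest), c < x) := by
  induction rest with
  | nil => simp [pvRun]
  | cons x xs ih =>
    rcases List.pairwise_cons.1 hp with ⟨hx, hxs⟩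
    by_cases hxc : x = c
    · subst hxc
      obtain ⟨h1, h2, h3⟩ := ih hx hxs
      refine ⟨by simp [pvRun, h1], ?_, ?_⟩
      · intro y hy
        simp [pvRun] at hy
        rcases hy with rfl | hy
        · rfl
        · exact h2 y hy
      · intro y hy
        simp [pvRun] at hy
        exact h3 y hy
    · have hcx : c < x := lt_of_le_of_ne (hle x (by simp)) (Ne.symm hxc)
      refine ⟨?_, ?_, ?_⟩
      · simp only [pvRun, if_neg hxc]
        simp [hxc]
        rw [List.count_eq_zero]
        intro hmem
        exact absurd (hx c hmem) (not_le.2 hcx)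
      · simp [pvRun, hxc]
      · intro y hy
        simp [pvRun, hxc] at hy
        rcases hy with rfl | hy
        · exact hcx
        · exact lt_of_lt_of_le hcx (hx y hy)

-- the heart: on a sorted list, pvGroup's heads are strictly increasing, cover the members,
-- and every pair is (head, total count)
theorem pvGroup_facts : ∀ (s : List Char), s.Pairwise (· ≤ ·) →
    ((pvGroup s).map Prod.fst).Pairwise (· < ·) ∧
    (∀ c, c ∈ (pvGroup s).map Prod.fst ↔ c ∈ s) ∧
    pvGroup s = ((pvGroup s).map Prod.fst).map (fun c => (c, s.count c)) := by
  intro s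
  induction s using pvGroup.induct with
  | case1 => intro _; simp [pvGroup]
  | case2 c rest ih =>
    intro hp
    rcases List.pairwise_cons.1 hp with ⟨hle, hrest⟩
    obtain ⟨hcnt, htake, hdrop⟩ := pvRun_facts c rest hle hrest
    set n := pvRun c rest with hn
    have hrest' : (rest.drop n).Pairwise (· ≤ ·) := hrest.sublist (List.drop_sublist _ _)
    obtain ⟨ihp, ihm, ihe⟩ := ih hrest'
    have hmemsplit : ∀ x ∈ rest, x = c ∨ x ∈ rest.drop n := by
      intro x hx
      rcases List.mem_append.1 (by rw [List.take_append_drop n rest]; exact hx) with h | h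
      · exact Or.inl (htake x h)
      · exact Or.inr h
    constructor
    · rw [pvGroup]
      simp only [← hn, List.map_cons, List.pairwise_cons]
      exact ⟨fun b hb => hdrop b ((ihm b).1 hb), ihp⟩
    constructor
    · intro d
      rw [pvGroup]
      simp only [← hn, List.map_cons, List.mem_cons, ihm]
      constructor
      · rintro (rfl | h)
        · exact Or.inl rfl
        · exact Or.inr (List.mem_of_mem_drop h)
      · rintro (rfl | h)
        · exact Or.inl rfl
        · rcases hmemsplit d h with rfl | h'
          · exact Or.inl rfl
          · exact Or.inr h'
    · rw [pvGroup]
      simp only [← hn, List.map_cons]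
      congr 1
      · simp [hcnt, hn]
      · calc pvGroup (rest.drop n)
            = ((pvGroup (rest.drop n)).map Prod.fst).map
                (fun d => (d, (rest.drop n).count d)) := ihe
          _ = ((pvGroup (rest.drop n)).map Prod.fst).map
                (fun d => (d, (c :: rest).count d)) := by
              apply List.map_congr_left
              intro d hd
              have hdmem : d ∈ rest.drop n := (ihm d).1 hd
              have hdc : c < d := hdrop d hdmem
              have htk : (rest.take n).count d = 0 := by
                rw [List.count_eq_zero]
                intro hmem
                exact absurd (htake d hmem) (fun he => lt_irrefl _ (he ▸ hdc))
              have : rest.count d = (rest.drop n).count d := by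
                conv_lhs => rw [← List.take_append_drop n rest]
                rw [List.count_append, htk]
                omega
              simp [List.count_cons, this]
              intro he; subst he; exact absurd hdc (lt_irrefl _)

-- ===== VERDICT (by name: the statement is the Claim_ definition above) =====
theorem create_dict_string_spec : Claim_equal_create_dict_string := by
  intro string _
  unfold Spec_create_dict_string create_dict_string create_dict_string_alt
  dsimp only
  set l := string.toList with hl
  set s := PySem.List.sorted l (fun c => c) with hs
  set keys := PySem.List.sorted (PySem.Set.ofList l) (fun c => c) with hk
  have hsperm : s.Perm l := PySem.List.sorted_perm l (fun c => c) false
  have hsp : s.Pairwise (· ≤ ·) := by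
    have := PySem.List.sorted_pairwise l (fun c => c)
    simpa using this
  have hkperm : keys.Perm (PySem.Set.ofList l) := PySem.List.sorted_perm _ _ false
  obtain ⟨hheadp, hheadm, hge⟩ := pvGroup_facts s hsp
  -- keys = heads of pvGroup s
  have hkeys : keys = (pvGroup s).map Prod.fst := by
    rw [hk]
    apply PySem.List.sorted_eq_of_perm_of_pairwise_lt
    · rw [List.perm_ext_iff_of_nodup ?_ (PySem.Set.nodup_ofList l)]
      · intro a
        rw [hheadm a, PySem.Set.mem_ofList]
        exact ⟨fun h => hsperm.mem_iff.1 h, fun h => hsperm.mem_iff.2 h⟩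
      · exact hheadp.imp (fun h => ne_of_lt h)
    · exact hheadp
  -- the inner loop counts the occurrences of list_string_sort[i] in the string
  have hinner : ∀ (i : Int) (d : PySem.Dict String Int),
      (fun d i =>
        let sum_letters := List.foldl (fun s y =>
            if PySem.List.pyGetD keys i ' ' = PySem.List.pyGetD l y ' '
            then s + 1 else s) (0 : Int)
          (PySem.List.pyRange 0 (PySem.List.len l))
        PySem.Dict.insert d (String.singleton (PySem.List.pyGetD keys i ' ')) sum_letters) d i =
      PySem.Dict.insert d (String.singleton (PySem.List.pyGetD keys i ' '))
        ((l.count (PySem.List.pyGetD keys i ' ') : Int)) := by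
    intro i d
    simp only
    congr 1
    rw [PySem.List.foldl_pyRange_pyGetD l ' '
        (fun s x => if PySem.List.pyGetD keys i ' ' = x then s + 1 else s) 0 (by norm_num)]
    simp only [Int.toNat_zero, List.drop_zero]
    have := PySem.List.foldl_count_if (fun x => PySem.List.pyGetD keys i ' ' == x) l 0
    simp only [beq_iff_eq] at this
    rw [this]
    simp [List.count_eq_countP, BEq.comm]
  have hbody : (fun (d : PySem.Dict String Int) (i : Int) =>
        let sum_letters := List.foldl (fun s y =>
            if PySem.List.pyGetD keys i ' ' = PySem.List.pyGetD l y ' '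
            then s + 1 else s) (0 : Int)
          (PySem.List.pyRange 0 (PySem.List.len l))
        PySem.Dict.insert d (String.singleton (PySem.List.pyGetD keys i ' ')) sum_letters) =
      (fun d i => PySem.Dict.insert d (String.singleton (PySem.List.pyGetD keys i ' '))
        ((l.count (PySem.List.pyGetD keys i ' ') : Int))) := by
    funext d i; exact hinner i d
  rw [hbody]
  -- the outer loop folds over the keys themselves
  rw [show (fun (d : PySem.Dict String Int) (i : Int) =>
        PySem.Dict.insert d (String.singleton (PySem.List.pyGetD keys i ' '))
          ((l.count (PySem.List.pyGetD keys i ' ') : Int))) =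
      (fun (d : PySem.Dict String Int) (i : Int) =>
        (fun d c => PySem.Dict.insert d (String.singleton c) ((l.count c : Int))) d
          (PySem.List.pyGetD keys i ' ')) from rfl]
  rw [PySem.List.foldl_pyRange_pyGetD keys ' '
      (fun d c => PySem.Dict.insert d (String.singleton c) ((l.count c : Int)))
      PySem.Dict.empty (by norm_num)]
  simp only [Int.toNat_zero, List.drop_zero]
  -- both sides are insert-folds over pair lists with pairwise-distinct keys
  have hheadnd : ((pvGroup s).map Prod.fst).Nodup := hheadp.imp (fun h => ne_of_lt h)
  have hkeysnd : keys.Nodup := by rw [hkeys]; exact hheadnd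
  have hsinginj : Function.Injective String.singleton := fun a b h => singleton_inj h
  have hnodA : ((keys.map (fun c => (String.singleton c, (l.count c : Int)))).map Prod.fst).Nodup := by
    rw [List.map_map]
    exact List.Nodup.map (fun a b h => singleton_inj h) hkeysnd
  have hnodB : (((pvGroup s).map (fun p => (String.singleton p.1, (p.2 : Int)))).map Prod.fst).Nodup := by
    rw [List.map_map]
    have : ((fun (p : String × Int) => p.1) ∘ fun (p : Char × Nat) => (String.singleton p.1, (p.2 : Int))) =
        (String.singleton ∘ Prod.fst) := rfl
    rw [this, ← List.map_map]
    exact List.Nodup.map (fun a b h => singleton_inj h) hheadnd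
  have hA : (List.foldl
        (fun d c => PySem.Dict.insert d (String.singleton c) ((l.count c : Int)))
        PySem.Dict.empty keys).items =
      keys.map (fun c => (String.singleton c, (l.count c : Int))) := by
    rw [show (fun (d : PySem.Dict String Int) (c : Char) =>
          PySem.Dict.insert d (String.singleton c) ((l.count c : Int))) =
        (fun (d : PySem.Dict String Int) c =>
          (fun d (p : String × Int) => PySem.Dict.insert d p.1 p.2) d
            ((fun c => (String.singleton c, (l.count c : Int))) c)) from rfl]
    rw [← List.foldl_map (f := fun c => (String.singleton c, (l.count c : Int)))
        (g := fun (d : PySem.Dict String Int) (p : String × Int) => PySem.Dict.insert d p.1 p.2)]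
    rw [foldl_insert_items _ PySem.Dict.empty hnodA (by simp [PySem.Dict.empty])]
    simp [PySem.Dict.empty]
  rw [hA]
  have hB : (PySem.Dict.ofList ((pvGroup s).map
        (fun p => (String.singleton p.1, (p.2 : Int))))).items =
      (pvGroup s).map (fun p => (String.singleton p.1, (p.2 : Int))) := by
    rw [PySem.Dict.ofList, PySem.Dict.update]
    rw [foldl_insert_items _ PySem.Dict.empty hnodB (by simp [PySem.Dict.empty])]
    simp [PySem.Dict.empty]
  rw [hB]
  -- finally, keys = run heads and per-key counts = run lengths
  rw [hkeys, hge, List.map_map]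
  apply List.map_congr_left
  intro d hd
  simp only [List.mem_map] at hd
  obtain ⟨c, hc, rfl⟩ := hd
  simp [hsperm.count_eq]
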